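-- pv_equiv track=rewrite | github.com/PythonNut/neural-autosegmenter | neural_autosegment.py | prepare_sequences
-- ===== SOURCE A (Python) =====
-- def prepare_sequences(text, start_index, chunklen):
--     # sequences = []
--     # start_index = 0
--     scan_index = start_index
--     chunk_index = 0
--     sequence = [None] * chunklen
--     spaces = [False] * chunklen
--     if text[start_index] == ' ':
--         return None
--     if start_index > 0 and text[start_index - 1] == ' ':
--         spaces[0] = True
--     while True:
--         if scan_index == len(text):
--             break
--         if chunk_index == chunklen:
--             return sequence, spaces
--             # sequences.append((sequence, spaces))
--             # chunk_index = 0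
--             # start_index += 5
--             # scan_index = start_index
--             # sequence = [None] * chunklen
--             # spaces = [False] * chunklen
--
--         if text[scan_index] == ' ':
--             if chunk_index < chunklen:
--                 spaces[chunk_index] = True
--                 scan_index += 1
--
--         else:
--             sequence[chunk_index] = text[scan_index]
--             scan_index += 1
--             chunk_index += 1
--     return None
-- ===== SOURCE B (Python) =====
-- def prepare_sequences(text, start_index, chunklen):
--     if text[start_index] == ' ':
--         return None
--     n = len(text)
--     positions = []
--     i = start_index
--     while len(positions) < chunklen and i < n:
--         if text[i] != ' ':
--             positions.append(i)
--         i += 1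
--     if len(positions) < chunklen or i >= n:
--         return None
--     sequence = [text[p] for p in positions]
--     spaces = [(text[p - 1] == ' ' if k > 0 else (p > 0 and text[p - 1] == ' '))
--               for k, p in enumerate(positions)]
--     return sequence, spaces
-- ===== Notes on version B (the rewrite author's own statement) =====
-- stated objective: simpler
-- what changed: A fills preallocated sequence/spaces arrays inside one stateful while-True loop with an inline chunk counter and transient space flags; B instead collects the index list of the chunk's non-space characters in a single bounded scan and then derives sequence and spaces by separate look-back passes over that index list.
import Mathlib
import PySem

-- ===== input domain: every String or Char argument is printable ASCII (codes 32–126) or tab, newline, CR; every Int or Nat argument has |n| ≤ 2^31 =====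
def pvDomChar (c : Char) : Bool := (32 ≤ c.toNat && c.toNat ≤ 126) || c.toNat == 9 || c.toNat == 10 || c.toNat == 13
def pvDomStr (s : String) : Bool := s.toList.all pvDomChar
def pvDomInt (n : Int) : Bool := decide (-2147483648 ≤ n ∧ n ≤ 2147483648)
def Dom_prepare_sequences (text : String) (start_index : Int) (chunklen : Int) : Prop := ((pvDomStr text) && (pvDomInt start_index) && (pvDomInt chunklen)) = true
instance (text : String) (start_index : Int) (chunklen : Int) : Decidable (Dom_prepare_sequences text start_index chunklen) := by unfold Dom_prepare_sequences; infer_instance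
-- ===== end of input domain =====

-- B collects the chunk's character positions in one bounded scan, then derives sequence and
-- space flags by look-back passes over that index list — simpler than A's stateful array filling.


-- ===== PORT A =====
-- A's `while True` loop; fuel (2*len+2 at the call, enough for every terminating run) only makes
-- the recursion total; `none` on pyGet?/pySet? failure mirrors Python raising IndexError there.
def pvALoop (cs : List Char) (chunklen : Int) :
    Nat → Int → Int → List (Option String) → List Bool → Option (List (Option String) × List Bool)
  | 0, _, _, _, _ => none
  | fuel + 1, scan, chunk, seq, spaces =>
    if scan = (cs.length : Int) then none
    else if chunk = chunklen then some (seq, spaces)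
    else
      match PySem.List.pyGet? cs scan with
      | none => none  -- IndexError in Python (outside Pre_)
      | some c =>
        if c = ' ' then
          if chunk < chunklen then
            match PySem.List.pySet? spaces chunk true with
            | none => none  -- IndexError in Python (outside Pre_)
            | some spaces' => pvALoop cs chunklen fuel (scan + 1) chunk seq spaces'
          else
            pvALoop cs chunklen fuel scan chunk seq spaces  -- Python loops forever here (outside Pre_)
        else
          match PySem.List.pySet? seq chunk (some (String.singleton c)) with
          | none => none  -- IndexError in Python (outside Pre_)
          | some seq' => pvALoop cs chunklen fuel (scan + 1) (chunk + 1) seq' spaces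

def prepare_sequences (text : String) (start_index : Int) (chunklen : Int) :
    Option (List (Option String) × List Bool) :=
  let cs := text.toList
  let seq : List (Option String) := List.replicate chunklen.toNat none   -- [None]*chunklen
  let spaces : List Bool := List.replicate chunklen.toNat false          -- [False]*chunklen
  match PySem.List.pyGet? cs start_index with
  | none => none  -- IndexError in Python (outside Pre_)
  | some c0 =>
    if c0 = ' ' then none
    else
      if 0 < start_index ∧ PySem.List.pyGet? cs (start_index - 1) = some ' ' then
        match PySem.List.pySet? spaces 0 true with
        | none => none  -- IndexError in Python (outside Pre_)
        | some spaces' => pvALoop cs chunklen (2 * cs.length + 2) start_index 0 seq spaces'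
      else
        pvALoop cs chunklen (2 * cs.length + 2) start_index 0 seq spaces

-- ===== PORT B =====
-- Source B's while-loop: gather positions of non-space chars; same fuel discipline as A's loop.
def pvBCollect (cs : List Char) (chunklen : Int) : Nat → Int → List Int → List Int × Int
  | 0, i, acc => (acc, i)
  | fuel + 1, i, acc =>
    if (acc.length : Int) < chunklen ∧ i < (cs.length : Int) then
      match PySem.List.pyGet? cs i with
      | none => (acc, i)  -- IndexError in Python (unreachable inside Pre_)
      | some c =>
        if c = ' ' then pvBCollect cs chunklen fuel (i + 1) acc
        else pvBCollect cs chunklen fuel (i + 1) (acc ++ [i])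
    else (acc, i)

def prepare_sequences_alt (text : String) (start_index : Int) (chunklen : Int) :
    Option (List (Option String) × List Bool) :=
  let cs := text.toList
  match PySem.List.pyGet? cs start_index with
  | none => none  -- IndexError in Python (outside Pre_)
  | some c0 =>
    if c0 = ' ' then none
    else
      match pvBCollect cs chunklen (2 * cs.length + 2) start_index [] with
      | (positions, i) =>
        if (positions.length : Int) < chunklen ∨ (cs.length : Int) ≤ i then none
        else
          some (positions.map (fun p => (PySem.List.pyGet? cs p).map String.singleton),
                (PySem.List.enumerate positions).map (fun kp =>
                  if 0 < kp.1 then (PySem.List.pyGet? cs (kp.2 - 1) == some ' ')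
                  else (decide (0 < kp.2) && (PySem.List.pyGet? cs (kp.2 - 1) == some ' '))))

-- ===== PRECONDITION & SPEC =====
-- Pre_ excludes exactly the inputs on which A raises IndexError: start_index out of range, and
-- (unless the start char is a space, which returns None first) chunklen < 0, or chunklen = 0 with
-- a space just before a start_index > 0 — there A stores into a zero-length preallocated array.
def Pre_prepare_sequences (text : String) (start_index : Int) (chunklen : Int) : Prop :=
  PySem.Raise.InRange text.toList.length start_index ∧
  (PySem.Str.pyGet? text start_index = some ' ' ∨
    (0 ≤ chunklen ∧
      ¬(chunklen = 0 ∧ 0 < start_index ∧ PySem.Str.pyGet? text (start_index - 1) = some ' ')))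
instance (text : String) (start_index : Int) (chunklen : Int) : Decidable (Pre_prepare_sequences text start_index chunklen) := by unfold Pre_prepare_sequences; infer_instance

def pvWitness_prepare_sequences : String × Int × Int := ("ab c", 0, 2)

def Spec_prepare_sequences (text : String) (start_index : Int) (chunklen : Int) (out : Option (List (Option String) × List Bool)) : Prop := out = prepare_sequences_alt text start_index chunklen
instance (text : String) (start_index : Int) (chunklen : Int) (out : Option (List (Option String) × List Bool)) : Decidable (Spec_prepare_sequences text start_index chunklen out) := by unfold Spec_prepare_sequences; infer_instance

-- ===== CLAIM (what is proved, stated in full; the proofs are below) =====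
def Claim_equal_prepare_sequences : Prop := ∀ (text : String) (start_index : Int) (chunklen : Int), Dom_prepare_sequences text start_index chunklen → Pre_prepare_sequences text start_index chunklen → Spec_prepare_sequences text start_index chunklen (prepare_sequences text start_index chunklen)

-- ===== LEMMAS AND PROOFS =====

-- look-back flag of position p: text[p-1] == ' '
def pvLook (cs : List Char) (p : Int) : Bool := PySem.List.pyGet? cs (p - 1) == some ' '

-- B's spaces list over a position list (head keeps the p > 0 guard)
def pvFlags (cs : List Char) : List Int → List Bool
  | [] => []
  | p :: rest => (decide (0 < p) && pvLook cs p) :: rest.map (pvLook cs)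

def pvSeqOf (cs : List Char) (acc : List Int) : List (Option String) :=
  acc.map (fun p => (PySem.List.pyGet? cs p).map String.singleton)

-- A's arrays at a loop state with collected positions `acc` and pending flag `pending`
def pvMkSeq (cs : List Char) (chunklen : Int) (acc : List Int) : List (Option String) :=
  pvSeqOf cs acc ++ List.replicate (chunklen - acc.length).toNat none

def pvMkSpaces (cs : List Char) (chunklen : Int) (acc : List Int) (pending : Bool) : List Bool :=
  pvFlags cs acc ++
    (if (acc.length : Int) < chunklen then
      pending :: List.replicate (chunklen - acc.length - 1).toNat false
    else [])

theorem pvFlags_length (cs : List Char) (acc : List Int) :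
    (pvFlags cs acc).length = acc.length := by
  cases acc <;> simp [pvFlags]

theorem pvSeqOf_length (cs : List Char) (acc : List Int) :
    (pvSeqOf cs acc).length = acc.length := by
  simp [pvSeqOf]

theorem pvEnumAux (cs : List Char) (rest : List Int) : ∀ (s : Int), 0 < s →
    (PySem.List.enumerate rest s).map (fun kp =>
      if 0 < kp.1 then (PySem.List.pyGet? cs (kp.2 - 1) == some ' ')
      else (decide (0 < kp.2) && (PySem.List.pyGet? cs (kp.2 - 1) == some ' ')))
      = rest.map (pvLook cs) := by
  induction rest with
  | nil => intro s _; simp [PySem.List.enumerate_nil]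
  | cons p rest ih =>
    intro s hs
    simp only [PySem.List.enumerate_cons, List.map_cons, if_pos hs]
    rw [ih (s + 1) (by omega)]
    simp [pvLook]

theorem pvEnumMap (cs : List Char) (acc : List Int) :
    (PySem.List.enumerate acc).map (fun kp =>
      if 0 < kp.1 then (PySem.List.pyGet? cs (kp.2 - 1) == some ' ')
      else (decide (0 < kp.2) && (PySem.List.pyGet? cs (kp.2 - 1) == some ' ')))
      = pvFlags cs acc := by
  cases acc with
  | nil => simp [pvFlags, PySem.List.enumerate_nil]
  | cons p rest =>
    simp only [PySem.List.enumerate_cons, List.map_cons, pvFlags]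
    rw [show (0:Int) + 1 = 1 by omega, pvEnumAux cs rest 1 (by omega)]
    simp [pvLook]

theorem pvFlags_append (cs : List Char) (acc : List Int) (p : Int) :
    pvFlags cs (acc ++ [p]) =
      pvFlags cs acc ++ [if acc = [] then (decide (0 < p) && pvLook cs p) else pvLook cs p] := by
  cases acc with
  | nil => simp [pvFlags]
  | cons q rest => simp [pvFlags]

theorem pvSetBoundary {α : Type} (l1 : List α) (x : α) (l2 : List α) (y : α) :
    (l1 ++ x :: l2).set l1.length y = l1 ++ y :: l2 := by
  induction l1 with
  | nil => simp
  | cons a l1 ih => simp [ih]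

theorem pvSim (cs : List Char) (chunklen start : Int)
    (hs0 : -(cs.length : Int) ≤ start) (hs1 : start < (cs.length : Int))
    (hns : PySem.List.pyGet? cs start ≠ some ' ') (hc : 0 ≤ chunklen) :
    ∀ (fuel : Nat) (scan : Int) (acc : List Int) (pending : Bool),
    start ≤ scan → scan ≤ (cs.length : Int) →
    ((cs.length : Int) - scan).toNat < fuel →
    (acc.length : Int) ≤ chunklen →
    (acc = [] → scan = start ∧ pending = (decide (0 < start) && pvLook cs start)) →
    (acc ≠ [] → pending = pvLook cs scan) →
    pvALoop cs chunklen fuel scan (acc.length : Int)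
        (pvMkSeq cs chunklen acc) (pvMkSpaces cs chunklen acc pending)
      = (match pvBCollect cs chunklen fuel scan acc with
         | (ps, i) =>
           if (ps.length : Int) < chunklen ∨ (cs.length : Int) ≤ i then none
           else some (pvSeqOf cs ps, pvFlags cs ps)) := by
  intro fuel
  induction fuel with
  | zero => intro scan acc pending _ _ hfuel _ _ _; omega
  | succ fuel ih =>
    intro scan acc pending hsc1 hsc2 hfuel hlen hnil hcons
    by_cases hend : scan = (cs.length : Int)
    · have hg : ¬((acc.length : Int) < chunklen ∧ scan < (cs.length : Int)) := by omega
      simp only [pvALoop, pvBCollect, if_pos hend, if_neg hg]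
      rw [if_pos (Or.inr (le_of_eq hend.symm))]
    · have hlt : scan < (cs.length : Int) := by omega
      obtain ⟨c, hc⟩ : ∃ c, PySem.List.pyGet? cs scan = some c := by
        cases h : PySem.List.pyGet? cs scan with
        | none =>
          rw [PySem.List.pyGet?_eq_none_iff] at h
          exact absurd (by simp only [PySem.Raise.InRange]; omega) h
        | some c => exact ⟨c, rfl⟩
      by_cases hfull : (acc.length : Int) = chunklen
      · have hg : ¬((acc.length : Int) < chunklen ∧ scan < (cs.length : Int)) := by omega
        simp only [pvALoop, pvBCollect, if_neg hg, if_neg hend, if_pos hfull]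
        rw [if_neg (show ¬((acc.length : Int) < chunklen ∨ (cs.length : Int) ≤ scan) by omega)]
        simp [pvMkSeq, pvMkSpaces, hfull]

      · have hlt2 : (acc.length : Int) < chunklen := by omega
        have haccne : acc = [] → scan = start := fun h => (hnil h).1
        have hg : (acc.length : Int) < chunklen ∧ scan < (cs.length : Int) := ⟨hlt2, hlt⟩
        simp only [pvALoop, pvBCollect, hc, if_neg hend, if_neg hfull, if_pos hg]
        by_cases hsp : c = ' '
        · simp only [if_pos hsp, if_pos hlt2]
          have hne : acc ≠ [] := by
            intro h
            rw [haccne h] at hc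
            rw [hsp] at hc
            exact hns hc
          -- the pending slot sits right after pvFlags cs acc
          have hspaces : pvMkSpaces cs chunklen acc pending =
              pvFlags cs acc ++ pending :: List.replicate (chunklen - acc.length - 1).toNat false := by
            simp [pvMkSpaces, if_pos hlt2]
          have hsetlen : acc.length < (pvMkSpaces cs chunklen acc pending).length := by
            rw [hspaces]; simp [pvFlags_length]
          rw [PySem.List.pySet?_natCast _ _ _ hsetlen]
          have hset : (pvMkSpaces cs chunklen acc pending).set acc.length true =
              pvMkSpaces cs chunklen acc true := by
            rw [hspaces, ← pvFlags_length cs acc, pvSetBoundary]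
            simp [pvMkSpaces, if_pos hlt2, pvFlags_length]
          rw [hset]
          exact ih (scan + 1) acc true (by omega) (by omega) (by omega) hlen
            (fun h => absurd h hne)
            (fun _ => by
              have h1 : scan + 1 - 1 = scan := by omega
              simp [pvLook, h1, hc, hsp])
        · simp only [if_neg hsp]
          have hrep : (chunklen - (acc.length : Int)).toNat
              = ((chunklen - (acc.length : Int) - 1).toNat) + 1 := by omega
          have hseq : pvMkSeq cs chunklen acc =
              pvSeqOf cs acc ++ none :: List.replicate (chunklen - acc.length - 1).toNat none := by
            rw [pvMkSeq, hrep, List.replicate_succ]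
          have hsetlen : acc.length < (pvMkSeq cs chunklen acc).length := by
            rw [hseq]; simp [pvSeqOf_length]
          rw [PySem.List.pySet?_natCast _ _ _ hsetlen]
          have hset : (pvMkSeq cs chunklen acc).set acc.length (some (String.singleton c)) =
              pvMkSeq cs chunklen (acc ++ [scan]) := by
            rw [hseq, ← pvSeqOf_length cs acc, pvSetBoundary]
            have h5 : chunklen - ((acc.length : Int) + 1) = chunklen - (acc.length : Int) - 1 := by
              ring
            simp [pvMkSeq, pvSeqOf, hc, h5]
          rw [hset]
          have hpend : pvMkSpaces cs chunklen acc pending =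
              pvMkSpaces cs chunklen (acc ++ [scan]) (pvLook cs (scan + 1)) := by
            have hlook : pvLook cs (scan + 1) = false := by
              have h1 : scan + 1 - 1 = scan := by omega
              simp [pvLook, h1, hc, hsp]
            have hflagnew : (if acc = [] then (decide (0 < scan) && pvLook cs scan) else pvLook cs scan)
                = pending := by
              by_cases h : acc = []
              · obtain ⟨h1, h2⟩ := hnil h
                rw [if_pos h, h1, h2]
              · rw [if_neg h, hcons h]
            rw [pvMkSpaces, pvMkSpaces, pvFlags_append, hflagnew, hlook]
            by_cases h2 : ((acc ++ [scan]).length : Int) < chunklen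
            · rw [if_pos hlt2, if_pos h2]
              have h3 : (chunklen - (acc.length : Int) - 1).toNat
                  = ((chunklen - ((acc ++ [scan]).length : Int) - 1).toNat) + 1 := by
                simp only [List.length_append, List.length_cons, List.length_nil] at h2 ⊢
                omega
              rw [h3, List.replicate_succ]
              simp
            · rw [if_pos hlt2, if_neg h2]
              have h3 : (chunklen - (acc.length : Int) - 1).toNat = 0 := by
                simp only [List.length_append, List.length_cons, List.length_nil] at h2 ⊢
                omega
              rw [h3]
              simp
          rw [hpend]
          have harg : (acc.length : Int) + 1 = (((acc ++ [scan]).length : Int)) := by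
            simp
          rw [harg]
          exact ih (scan + 1) (acc ++ [scan]) (pvLook cs (scan + 1)) (by omega) (by omega)
            (by omega) (by simp; omega) (by simp) (fun _ => rfl)

-- ===== VERDICT (by name: the statement is the Claim_ definition above) =====
theorem pvMkSeq_nil (cs : List Char) (c : Int) : pvMkSeq cs c [] = List.replicate c.toNat none := by
  simp [pvMkSeq, pvSeqOf]

theorem pvMkSpaces_nil_false (cs : List Char) (c : Int) (hc : 0 ≤ c) :
    pvMkSpaces cs c [] false = List.replicate c.toNat false := by
  unfold pvMkSpaces pvFlags
  simp only [List.length_nil, Nat.cast_zero, Int.sub_zero, List.nil_append]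
  by_cases h : (0 : Int) < c
  · rw [if_pos h]
    have h1 : c.toNat = (c - 1).toNat + 1 := by omega
    rw [h1, List.replicate_succ]
  · rw [if_neg h]
    have h1 : c.toNat = 0 := by omega
    rw [h1, List.replicate_zero]

theorem pvMkSpaces_nil_true (cs : List Char) (c : Int) (hc : 0 < c) :
    pvMkSpaces cs c [] true = true :: List.replicate (c.toNat - 1) false := by
  unfold pvMkSpaces pvFlags
  simp only [List.length_nil, Nat.cast_zero, Int.sub_zero, List.nil_append]
  rw [if_pos hc]
  have h1 : (c - 1).toNat = c.toNat - 1 := by omega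
  rw [h1]

theorem pvBFinish (cs : List Char) (c : Int) (fuel : Nat) (s : Int) :
    (match pvBCollect cs c fuel s [] with
     | (ps, i) =>
       if (ps.length : Int) < c ∨ (cs.length : Int) ≤ i then none
       else some (pvSeqOf cs ps, pvFlags cs ps))
    = (if (((pvBCollect cs c fuel s []).1.length : Int) < c ∨
            (cs.length : Int) ≤ (pvBCollect cs c fuel s []).2) then none
       else
         some ((pvBCollect cs c fuel s []).1.map
                 (fun p => (PySem.List.pyGet? cs p).map String.singleton),
               (PySem.List.enumerate (pvBCollect cs c fuel s []).1).map (fun kp =>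
                 if 0 < kp.1 then (PySem.List.pyGet? cs (kp.2 - 1) == some ' ')
                 else (decide (0 < kp.2) && (PySem.List.pyGet? cs (kp.2 - 1) == some ' '))))) := by
  rcases h : pvBCollect cs c fuel s [] with ⟨ps, i⟩
  simp only [h]
  split_ifs with hh
  · rfl
  · rw [pvEnumMap]
    rfl

theorem prepare_sequences_spec : Claim_equal_prepare_sequences := by
  intro text s c _ hpre
  unfold Spec_prepare_sequences
  obtain ⟨hin, hrest⟩ := hpre
  have hin' : -(text.toList.length : Int) ≤ s ∧ s < (text.toList.length : Int) := by
    simpa [PySem.Raise.InRange] using hin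
  unfold prepare_sequences prepare_sequences_alt
  simp only []
  cases hget : PySem.List.pyGet? text.toList s with
  | none => rfl
  | some c0 =>
    dsimp only
    by_cases hc0 : c0 = ' '
    · rw [if_pos hc0, if_pos hc0]
    · rw [if_neg hc0, if_neg hc0]
      have hsget : PySem.Str.pyGet? text s = some c0 := by
        simp [PySem.Str.pyGet?, hget]
      have hcase : 0 ≤ c ∧ ¬(c = 0 ∧ 0 < s ∧ PySem.Str.pyGet? text (s - 1) = some ' ') := by
        rcases hrest with h | h
        · rw [hsget] at h
          exact absurd (Option.some.inj h) hc0
        · exact h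
      have hns : PySem.List.pyGet? text.toList s ≠ some ' ' := by
        rw [hget]
        intro h
        exact hc0 (Option.some.inj h)
      have hprev : PySem.Str.pyGet? text (s - 1) = PySem.List.pyGet? text.toList (s - 1) := by
        simp [PySem.Str.pyGet?]
      rw [← pvBFinish]
      by_cases hg : 0 < s ∧ PySem.List.pyGet? text.toList (s - 1) = some ' '
      · rw [if_pos hg]
        have hcpos : 0 < c := by
          rcases hcase with ⟨h0, h1⟩
          rw [hprev] at h1
          rcases lt_or_eq_of_le h0 with h | h
          · exact h
          · exact absurd ⟨h.symm, hg⟩ h1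
        have hlen0 : (0 : Nat) < (List.replicate c.toNat (false : Bool)).length := by
          simp; omega
        rw [show (0 : Int) = ((0 : Nat) : Int) by simp,
          PySem.List.pySet?_natCast _ _ _ hlen0]
        have hrepl : (List.replicate c.toNat (false : Bool)).set 0 true
            = true :: List.replicate (c.toNat - 1) false := by
          have h1 : c.toNat = (c.toNat - 1) + 1 := by omega
          rw [h1, List.replicate_succ]
          simp
        rw [hrepl, ← pvMkSpaces_nil_true text.toList c hcpos, ← pvMkSeq_nil text.toList c]
        have hsim := pvSim text.toList c s hin'.1 hin'.2 hns hcase.1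
          (2 * text.toList.length + 2) s [] true (le_refl s) (le_of_lt hin'.2)
          (by omega) (by simp; exact hcase.1)
          (fun _ => ⟨rfl, by simp [pvLook, hg.1, hg.2]⟩)
          (fun h => absurd rfl h)
        simpa using hsim
      · rw [if_neg hg]
        have hpd : (decide (0 < s) && pvLook text.toList s) = false := by
          by_cases h1 : 0 < s
          · have h2 : ¬ PySem.List.pyGet? text.toList (s - 1) = some ' ' :=
              fun h => hg ⟨h1, h⟩
            simp [pvLook, h2]
          · simp [h1]
        rw [← pvMkSpaces_nil_false text.toList c hcase.1, ← pvMkSeq_nil text.toList c]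
        have hsim := pvSim text.toList c s hin'.1 hin'.2 hns hcase.1
          (2 * text.toList.length + 2) s [] false (le_refl s) (le_of_lt hin'.2)
          (by omega) (by simp; exact hcase.1)
          (fun _ => ⟨rfl, hpd.symm⟩)
          (fun h => absurd rfl h)
        simpa using hsim
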